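-- pv_equiv track=rewrite | github.com/vvrmahendra/DS-AlgoPrac | dp/party.py | solve
-- ===== SOURCE A (Python) =====
-- def solve(A):
--     if A <= 2: return A
--     first = 1
--     second = 2
--     for i in range(A-2):
--         temp = (second+(i+2)*first)%10003
--         first = second
--         second = temp
--
--     return second%10003
-- ===== SOURCE B (Python) =====
-- # Block matrix-power re-implementation: the recurrence's step matrix depends on
-- # the index only mod p, so per prime factor p of 10003 = 7 * 1429 we take the
-- # product of one period's matrices and raise it to a power, then recombine by CRT.
--
-- def _matmul(X, Y, p):
--     a, b, c, d = X
--     e, f, g, h = Y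
--     return ((a * e + b * g) % p, (a * f + b * h) % p,
--             (c * e + d * g) % p, (c * f + d * h) % p)
--
-- def _matpow(M, e, p):
--     if e == 0:
--         return (1, 0, 0, 1)
--     R = _matpow(_matmul(M, M, p), e // 2, p)
--     if e % 2 == 1:
--         R = _matmul(M, R, p)
--     return R
--
-- def _block(p):
--     B = (1 % p, 0, 0, 1 % p)
--     for c in range(p):
--         B = _matmul((0, 1, c, 1), B, p)
--     return B
--
-- def _iv_mod(A, p):
--     n = A - 2
--     first, second = 1 % p, 2 % p
--     m = min(n, p - 2)
--     for i in range(m):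
--         first, second = second, (second + (i + 2) * first) % p
--     q = (n - m) // p
--     r = (n - m) % p
--     if q > 0:
--         a, b, c, d = _matpow(_block(p), q, p)
--         first, second = (a * first + b * second) % p, (c * first + d * second) % p
--     for c in range(r):
--         first, second = second, (second + c * first) % p
--     return second
--
-- def solve(A):
--     if A <= 2:
--         return A
--     r7 = _iv_mod(A, 7)
--     r1429 = _iv_mod(A, 1429)
--     return (r1429 + 1429 * ((r7 - r1429) % 7)) % 10003
-- ===== Notes on version B (the rewrite author's own statement) =====
-- stated objective: faster
-- what changed: Replaces the linear-time stepwise dp recurrence by matrix exponentiation: the step matrix depends on the index only modulo p, so for each of the two prime factors of the composite modulus B raises the product of one period's step matrices to a power by fast squaring and recombines the two residues by CRT.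
import Mathlib
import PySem

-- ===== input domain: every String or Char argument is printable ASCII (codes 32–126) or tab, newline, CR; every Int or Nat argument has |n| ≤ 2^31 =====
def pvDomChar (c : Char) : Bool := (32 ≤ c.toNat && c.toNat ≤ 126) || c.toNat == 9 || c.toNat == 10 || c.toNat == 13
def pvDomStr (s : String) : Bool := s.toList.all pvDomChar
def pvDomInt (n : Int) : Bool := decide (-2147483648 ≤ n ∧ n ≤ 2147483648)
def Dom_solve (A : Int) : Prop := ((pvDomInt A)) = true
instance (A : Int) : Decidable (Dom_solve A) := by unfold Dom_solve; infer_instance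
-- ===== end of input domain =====

-- B replaces A's linear-time stepwise recurrence by block matrix exponentiation modulo
-- each prime factor of the composite modulus, recombined by CRT (faster: asymptotic).

-- ===== PORT A =====
def solve (A : Int) : Int :=
  if A ≤ 2 then A
  else
    let fs := (PySem.List.pyRange 0 (A - 2) 1).foldl
      (fun (fs : Int × Int) i =>
        let temp := PySem.Int.mod (fs.2 + (i + 2) * fs.1) 10003
        (fs.2, temp)) (1, 2)
    PySem.Int.mod fs.2 10003

-- ===== PORT B =====
def matmulB (X Y : Int × Int × Int × Int) (p : Int) : Int × Int × Int × Int :=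
  match X, Y with
  | (a, b, c, d), (e, f, g, h) =>
    (PySem.Int.mod (a * e + b * g) p, PySem.Int.mod (a * f + b * h) p,
     PySem.Int.mod (c * e + d * g) p, PySem.Int.mod (c * f + d * h) p)

-- python's `_matpow` recurses with e // 2; it is only called with e > 0 and
-- diverges for e < 0, so the `e ≤ 0` base case (python: `e == 0`) only makes
-- the same computation total.
def matpowB (M : Int × Int × Int × Int) (e : Int) (p : Int) : Int × Int × Int × Int :=
  if _h : e ≤ 0 then (1, 0, 0, 1)
  else
    let R := matpowB (matmulB M M p) (PySem.Int.floordiv e 2) p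
    if PySem.Int.mod e 2 = 1 then matmulB M R p else R
termination_by e.toNat
decreasing_by
  rw [PySem.Int.floordiv_eq_ediv_of_pos (by omega)]
  omega

def blockB (p : Int) : Int × Int × Int × Int :=
  (PySem.List.pyRange 0 p 1).foldl (fun B c => matmulB (0, 1, c, 1) B p)
    (PySem.Int.mod 1 p, 0, 0, PySem.Int.mod 1 p)

def ivModB (A p : Int) : Int :=
  let n := A - 2
  let m := min n (p - 2)
  let fs := (PySem.List.pyRange 0 m 1).foldl
    (fun (fs : Int × Int) i => (fs.2, PySem.Int.mod (fs.2 + (i + 2) * fs.1) p))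
    (PySem.Int.mod 1 p, PySem.Int.mod 2 p)
  let q := PySem.Int.floordiv (n - m) p
  let r := PySem.Int.mod (n - m) p
  let fs2 :=
    if 0 < q then
      match matpowB (blockB p) q p with
      | (a, b, c, d) =>
        (PySem.Int.mod (a * fs.1 + b * fs.2) p, PySem.Int.mod (c * fs.1 + d * fs.2) p)
    else fs
  let fs3 := (PySem.List.pyRange 0 r 1).foldl
    (fun (fs : Int × Int) c => (fs.2, PySem.Int.mod (fs.2 + c * fs.1) p)) fs2
  fs3.2

def solve_alt (A : Int) : Int :=
  if A ≤ 2 then A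
  else
    let r7 := ivModB A 7
    let r1429 := ivModB A 1429
    PySem.Int.mod (r1429 + 1429 * PySem.Int.mod (r7 - r1429) 7) 10003

-- ===== PRECONDITION & SPEC =====
def Spec_solve (A : Int) (out : Int) : Prop := out = solve_alt A
instance (A : Int) (out : Int) : Decidable (Spec_solve A out) := by unfold Spec_solve; infer_instance

-- ===== CLAIM (what is proved, stated in full; the proofs are below) =====
def Claim_equal_solve : Prop := ∀ (A : Int), Dom_solve A → Spec_solve A (solve A)


-- ===== LEMMAS AND PROOFS =====

-- ---- generic Nat-indexed forms of the three pair-state loops ----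
def loopI (m off : Int) (init : Int × Int) : ℕ → Int × Int
  | 0 => init
  | k + 1 =>
    ((loopI m off init k).2,
     PySem.Int.mod ((loopI m off init k).2 + ((k : Int) + off) * (loopI m off init k).1) m)

def blkI (p : Int) : ℕ → Int × Int × Int × Int
  | 0 => (PySem.Int.mod 1 p, 0, 0, PySem.Int.mod 1 p)
  | k + 1 => matmulB (0, 1, (k : Int), 1) (blkI p k) p

-- ---- pure spec over ZMod p ----
def pvStep (p : ℕ) (c : ZMod p) (v : ZMod p × ZMod p) : ZMod p × ZMod p := (v.2, v.2 + c * v.1)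

def sseq (p off : ℕ) (v : ZMod p × ZMod p) : ℕ → ZMod p × ZMod p
  | 0 => v
  | k + 1 => pvStep p ((k + off : ℕ) : ZMod p) (sseq p off v k)

def stepM (p : ℕ) (c : ZMod p) : Matrix (Fin 2) (Fin 2) (ZMod p) := !![0, 1; c, 1]

def segM (p off : ℕ) : ℕ → Matrix (Fin 2) (Fin 2) (ZMod p)
  | 0 => 1
  | k + 1 => stepM p ((k + off : ℕ) : ZMod p) * segM p off k

def applyM (p : ℕ) (M : Matrix (Fin 2) (Fin 2) (ZMod p)) (v : ZMod p × ZMod p) :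
    ZMod p × ZMod p :=
  (M 0 0 * v.1 + M 0 1 * v.2, M 1 0 * v.1 + M 1 1 * v.2)

def toMat (p : ℕ) (X : Int × Int × Int × Int) : Matrix (Fin 2) (Fin 2) (ZMod p) :=
  !![(X.1 : ZMod p), (X.2.1 : ZMod p); (X.2.2.1 : ZMod p), (X.2.2.2 : ZMod p)]

-- ---- fold-to-Nat-recursion bridges ----
theorem pyfold_loopI (m off : Int) (init : Int × Int) (k : ℕ) :
    (PySem.List.pyRange 0 (k : Int) 1).foldl
      (fun (fs : Int × Int) i => (fs.2, PySem.Int.mod (fs.2 + (i + off) * fs.1) m)) init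
      = loopI m off init k := by
  rw [PySem.List.pyRange_one, show ((k : Int) - 0).toNat = k by omega, List.foldl_map]
  induction k with
  | zero => rfl
  | succ n ih =>
    rw [List.range_succ, List.foldl_append, ih]
    simp [loopI]

theorem pyfold_blkI (p : Int) (hp : 0 ≤ p) : blockB p = blkI p p.toNat := by
  have hb : (p - 0).toNat = p.toNat := by omega
  rw [blockB, PySem.List.pyRange_one, hb, List.foldl_map]
  induction p.toNat with
  | zero => rfl
  | succ n ih =>
    rw [List.range_succ, List.foldl_append, ih]
    simp [blkI]

-- ---- cast lemmas ----
theorem castmod (p : ℕ) (x m : Int) (hm : 0 < m) (hd : (p : Int) ∣ m) :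
    ((PySem.Int.mod x m : Int) : ZMod p) = (x : ZMod p) := by
  rw [PySem.Int.mod_eq_emod_of_pos hm, ZMod.intCast_eq_intCast_iff]
  exact Int.emod_emod_of_dvd x hd

theorem cast_loopI (p : ℕ) (m : Int) (off : ℕ) (hm : 0 < m) (hd : (p : Int) ∣ m)
    (i1 i2 : Int) (v1 v2 : ZMod p)
    (h1 : (i1 : ZMod p) = v1) (h2 : (i2 : ZMod p) = v2) (k : ℕ) :
    (((loopI m (off : Int) (i1, i2) k).1 : ZMod p) = (sseq p off (v1, v2) k).1 ∧
     ((loopI m (off : Int) (i1, i2) k).2 : ZMod p) = (sseq p off (v1, v2) k).2) := by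
  induction k with
  | zero => exact ⟨h1, h2⟩
  | succ n ih =>
    obtain ⟨ih1, ih2⟩ := ih
    refine ⟨ih2, ?_⟩
    show ((PySem.Int.mod _ m : Int) : ZMod p) = _
    rw [castmod p _ m hm hd]
    simp only [sseq, pvStep]
    push_cast
    rw [ih1, ih2]

-- ---- matrix algebra ----
theorem applyM_one (p : ℕ) (v : ZMod p × ZMod p) : applyM p 1 v = v := by
  simp [applyM]

theorem applyM_mul (p : ℕ) (X Y : Matrix (Fin 2) (Fin 2) (ZMod p)) (v : ZMod p × ZMod p) :
    applyM p (X * Y) v = applyM p X (applyM p Y v) := by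
  simp only [applyM, Matrix.mul_apply, Fin.sum_univ_two]
  exact Prod.ext (by ring) (by ring)

theorem applyM_stepM (p : ℕ) (c : ZMod p) (v : ZMod p × ZMod p) :
    applyM p (stepM p c) v = pvStep p c v := by
  simp [applyM, stepM, pvStep]
  ring

theorem toMat_matmulB (p : ℕ) (hp : 0 < (p : Int)) (X Y : Int × Int × Int × Int) :
    toMat p (matmulB X Y (p : Int)) = toMat p X * toMat p Y := by
  obtain ⟨a, b, c, d⟩ := X
  obtain ⟨e, f, g, h⟩ := Y
  ext i j
  fin_cases i <;> fin_cases j <;>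
    simp [toMat, matmulB, Matrix.mul_apply, Fin.sum_univ_two, castmod p _ _ hp ⟨1, by ring⟩]

theorem toMat_matpowB (p : ℕ) (hp : 0 < (p : Int)) (M : Int × Int × Int × Int) (e : Int)
    (_he : 0 ≤ e) : toMat p (matpowB M e (p : Int)) = (toMat p M) ^ e.toNat := by
  clear _he
  induction M, e using matpowB.induct (p := (p : Int)) with
  | case1 M e hle =>
    rw [matpowB, dif_pos hle, show e.toNat = 0 by omega, pow_zero]
    simp [toMat, Matrix.one_fin_two]
  | case2 M e hle hodd ih =>
    rw [matpowB, dif_neg hle]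
    simp only [if_pos hodd]
    rw [toMat_matmulB p hp, ih, toMat_matmulB p hp,
        PySem.Int.floordiv_eq_ediv_of_pos (by norm_num), ← sq, ← pow_mul, ← pow_succ']
    have hm : PySem.Int.mod e 2 = e % 2 := PySem.Int.mod_eq_emod_of_pos (by norm_num)
    congr 1
    omega
  | case3 M e hle hodd ih =>
    rw [matpowB, dif_neg hle]
    simp only [if_neg hodd]
    rw [ih, toMat_matmulB p hp, PySem.Int.floordiv_eq_ediv_of_pos (by norm_num), ← sq, ← pow_mul]
    have hm : PySem.Int.mod e 2 = e % 2 := PySem.Int.mod_eq_emod_of_pos (by norm_num)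
    congr 1
    omega

theorem toMat_blkI (p : ℕ) (hp : 0 < (p : Int)) (k : ℕ) :
    toMat p (blkI (p : Int) k) = segM p 0 k := by
  induction k with
  | zero =>
    show toMat p (PySem.Int.mod 1 (p : Int), 0, 0, PySem.Int.mod 1 (p : Int)) = 1
    simp [toMat, Matrix.one_fin_two, castmod p _ _ hp ⟨1, by ring⟩]
  | succ n ih =>
    rw [blkI, toMat_matmulB p hp, ih, segM]
    congr 1
    simp [toMat, stepM]

-- ---- sequence decomposition ----
theorem sseq_add (p off : ℕ) (v : ZMod p × ZMod p) (a t : ℕ) :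
    sseq p off v (a + t) = sseq p (off + a) (sseq p off v a) t := by
  induction t with
  | zero => rfl
  | succ n ih =>
    have h1 : a + (n + 1) = (a + n) + 1 := by omega
    rw [h1]
    show pvStep p ((a + n + off : ℕ) : ZMod p) _ = pvStep p ((n + (off + a) : ℕ) : ZMod p) _
    rw [ih, show a + n + off = n + (off + a) by omega]

theorem sseq_period (p off : ℕ) (hd : p ∣ off) (v : ZMod p × ZMod p) (t : ℕ) :
    sseq p off v t = sseq p 0 v t := by
  induction t with
  | zero => rfl
  | succ n ih =>
    obtain ⟨c, rfl⟩ := hd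
    show pvStep p ((n + p * c : ℕ) : ZMod p) _ = pvStep p ((n + 0 : ℕ) : ZMod p) _
    rw [ih]
    congr 1
    push_cast
    simp

theorem sseq_eq_applyM_segM (p off : ℕ) (v : ZMod p × ZMod p) (t : ℕ) :
    sseq p off v t = applyM p (segM p off t) v := by
  induction t with
  | zero => exact (applyM_one p v).symm
  | succ n ih =>
    show pvStep p _ _ = applyM p (stepM p _ * segM p off n) v
    rw [applyM_mul, ← ih, applyM_stepM]

theorem sseq_blocks (p : ℕ) (v : ZMod p × ZMod p) (q : ℕ) :
    sseq p 0 v (q * p) = applyM p ((segM p 0 p) ^ q) v := by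
  induction q with
  | zero => simpa [sseq] using (applyM_one p v).symm
  | succ n ih =>
    have h1 : (n + 1) * p = n * p + p := by ring
    rw [h1, sseq_add, sseq_period p (0 + n * p) ⟨n, by ring⟩, ih,
        sseq_eq_applyM_segM, ← applyM_mul, ← pow_succ']


theorem pyfold_loopI0 (m : Int) (init : Int × Int) (k : ℕ) :
    (PySem.List.pyRange 0 (k : Int) 1).foldl
      (fun (fs : Int × Int) c => (fs.2, PySem.Int.mod (fs.2 + c * fs.1) m)) init
      = loopI m 0 init k := by
  have h : (fun (fs : Int × Int) (c : Int) => (fs.2, PySem.Int.mod (fs.2 + c * fs.1) m))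
      = fun (fs : Int × Int) i => (fs.2, PySem.Int.mod (fs.2 + (i + 0) * fs.1) m) := by
    funext fs i; rw [add_zero]
  rw [h, pyfold_loopI]

theorem loopI_snd_bounds (m off : Int) (init : Int × Int) (hm : 0 < m)
    (h : 0 ≤ init.2 ∧ init.2 < m) (k : ℕ) :
    0 ≤ (loopI m off init k).2 ∧ (loopI m off init k).2 < m := by
  cases k with
  | zero => exact h
  | succ n => exact ⟨PySem.Int.mod_nonneg _ hm, PySem.Int.mod_lt _ hm⟩

theorem spec_decomp (p : ℕ) (hp : 3 ≤ p) (N : ℕ) :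
    sseq p 2 (1, 2) N =
      sseq p 0 (applyM p ((segM p 0 p) ^ ((N - min N (p - 2)) / p))
        (sseq p 2 (1, 2) (min N (p - 2)))) ((N - min N (p - 2)) % p) := by
  by_cases hle : N ≤ p - 2
  · rw [min_eq_left hle, Nat.sub_self]
    rw [Nat.zero_div, Nat.zero_mod, pow_zero, applyM_one]
    rfl
  · have hmin : min N (p - 2) = p - 2 := min_eq_right (by omega)
    rw [hmin]
    set t := N - (p - 2) with ht
    conv_lhs => rw [show N = (p - 2) + t by omega, ← Nat.div_add_mod' t p]
    rw [sseq_add, sseq_add, show 2 + (p - 2) = p by omega,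
        sseq_period p p (dvd_refl p), sseq_blocks,
        sseq_period p (p + t / p * p) ⟨1 + t / p, by ring⟩]

theorem applyM_toMat (p : ℕ) (X : Int × Int × Int × Int) (v : ZMod p × ZMod p) :
    applyM p (toMat p X) v =
      ((X.1 : ZMod p) * v.1 + (X.2.1 : ZMod p) * v.2,
       (X.2.2.1 : ZMod p) * v.1 + (X.2.2.2 : ZMod p) * v.2) := by
  simp [applyM, toMat]

-- ---- main per-prime ivModB characterisation ----
theorem ivModB_correct (p : ℕ) (hp : 3 ≤ p) (A : Int) (hA : 3 ≤ A) :
    (0 ≤ ivModB A (p : Int) ∧ ivModB A (p : Int) < (p : Int)) ∧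
    ((ivModB A (p : Int) : ZMod p) = (sseq p 2 (1, 2) (A - 2).toNat).2) := by
  have hpI : (0 : Int) < (p : Int) := by omega
  set N := (A - 2).toNat with hN
  set mN := min N (p - 2) with hmN
  have hmin2 : min ((N : ℕ) : Int) ((p : Int) - 2) = (mN : Int) := by omega
  have hA2 : A - 2 = (N : Int) := by omega
  have hsub : ((N : ℕ) : Int) - (mN : Int) = ((N - mN : ℕ) : Int) := by omega
  simp only [ivModB]
  rw [hA2, hmin2, hsub, PySem.Int.floordiv_natCast, PySem.Int.mod_natCast, pyfold_loopI,
      pyfold_loopI0]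
  have hc1 : ((PySem.Int.mod 1 (p : Int) : Int) : ZMod p) = (1 : ZMod p) := by
    rw [castmod p _ _ hpI (dvd_refl _)]; norm_num
  have hc2 : ((PySem.Int.mod 2 (p : Int) : Int) : ZMod p) = (2 : ZMod p) := by
    rw [castmod p _ _ hpI (dvd_refl _)]; norm_num
  have hFS := cast_loopI p (p : Int) 2 hpI (dvd_refl _)
    (PySem.Int.mod 1 (p : Int)) (PySem.Int.mod 2 (p : Int)) 1 2 hc1 hc2 mN
  norm_num at hFS
  constructor
  · apply loopI_snd_bounds _ _ _ hpI
    by_cases h0 : (0 : Int) < (((N - mN) / p : ℕ) : Int)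
    · rw [if_pos h0]
      dsimp only
      exact ⟨PySem.Int.mod_nonneg _ hpI, PySem.Int.mod_lt _ hpI⟩
    · rw [if_neg h0]
      apply loopI_snd_bounds _ _ _ hpI
      dsimp only
      exact ⟨PySem.Int.mod_nonneg _ hpI, PySem.Int.mod_lt _ hpI⟩
  · rw [spec_decomp p hp N, ← hmN]
    by_cases h0 : (0 : Int) < (((N - mN) / p : ℕ) : Int)
    · rw [if_pos h0]
      have hPcast : toMat p (matpowB (blockB (p : Int)) (((N - mN) / p : ℕ) : Int) (p : Int))
          = (segM p 0 p) ^ ((N - mN) / p) := by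
        rw [toMat_matpowB p hpI _ _ (by omega), pyfold_blkI _ (by omega),
            show ((p : Int)).toNat = p by omega, toMat_blkI p hpI,
            show ((((N - mN) / p : ℕ) : Int)).toNat = (N - mN) / p by omega]
      have happ := applyM_toMat p
        (matpowB (blockB (p : Int)) (((N - mN) / p : ℕ) : Int) (p : Int))
        (sseq p 2 (1, 2) mN)
      rw [hPcast] at happ
      have hv1 : ((PySem.Int.mod
          ((matpowB (blockB (p : Int)) (((N - mN) / p : ℕ) : Int) (p : Int)).1 *
              (loopI (p : Int) 2 (PySem.Int.mod 1 (p : Int), PySem.Int.mod 2 (p : Int)) mN).1 +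
            (matpowB (blockB (p : Int)) (((N - mN) / p : ℕ) : Int) (p : Int)).2.1 *
              (loopI (p : Int) 2 (PySem.Int.mod 1 (p : Int), PySem.Int.mod 2 (p : Int)) mN).2)
          (p : Int) : Int) : ZMod p)
          = ((applyM p ((segM p 0 p) ^ ((N - mN) / p)) (sseq p 2 (1, 2) mN)).1) := by
        rw [castmod p _ _ hpI (dvd_refl _), happ]
        push_cast
        rw [hFS.1, hFS.2]
      have hv2 : ((PySem.Int.mod
          ((matpowB (blockB (p : Int)) (((N - mN) / p : ℕ) : Int) (p : Int)).2.2.1 *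
              (loopI (p : Int) 2 (PySem.Int.mod 1 (p : Int), PySem.Int.mod 2 (p : Int)) mN).1 +
            (matpowB (blockB (p : Int)) (((N - mN) / p : ℕ) : Int) (p : Int)).2.2.2 *
              (loopI (p : Int) 2 (PySem.Int.mod 1 (p : Int), PySem.Int.mod 2 (p : Int)) mN).2)
          (p : Int) : Int) : ZMod p)
          = ((applyM p ((segM p 0 p) ^ ((N - mN) / p)) (sseq p 2 (1, 2) mN)).2) := by
        rw [castmod p _ _ hpI (dvd_refl _), happ]
        push_cast
        rw [hFS.1, hFS.2]
      have h := cast_loopI p (p : Int) 0 hpI (dvd_refl _) _ _ _ _ hv1 hv2 ((N - mN) % p)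
      norm_num at h
      exact h.2
    · rw [if_neg h0]
      have hq0 : (N - mN) / p = 0 := by
        rcases Nat.eq_zero_or_pos ((N - mN) / p) with h | h
        · exact h
        · exact absurd (by exact_mod_cast h) h0
      rw [hq0, pow_zero, applyM_one]
      have h := cast_loopI p (p : Int) 0 hpI (dvd_refl _) _ _ _ _ hFS.1 hFS.2 ((N - mN) % p)
      norm_num at h
      exact h.2

-- ---- A-side characterisation ----
theorem solveA_char (A : Int) (hA : 3 ≤ A) :
    solve A = (loopI 10003 2 (1, 2) (A - 2).toNat).2 ∧
    0 ≤ solve A ∧ solve A < 10003 ∧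
    ((solve A : ZMod 7) = (sseq 7 2 (1, 2) (A - 2).toNat).2 ∧
     (solve A : ZMod 1429) = (sseq 1429 2 (1, 2) (A - 2).toNat).2) := by
  have hA2 : A - 2 = (((A - 2).toNat : ℕ) : Int) := by omega
  have e0 : solve A = PySem.Int.mod ((loopI 10003 2 (1, 2) (A - 2).toNat).2) 10003 := by
    simp only [solve, if_neg (show ¬ A ≤ 2 by omega)]
    rw [hA2, pyfold_loopI, show ((((A - 2).toNat : ℕ) : Int)).toNat = (A - 2).toNat by omega]
  have hb := loopI_snd_bounds 10003 2 (1, 2) (by norm_num) (by norm_num) (A - 2).toNat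
  have e1 : solve A = (loopI 10003 2 (1, 2) (A - 2).toNat).2 := by
    rw [e0, PySem.Int.mod_eq_emod_of_pos (by norm_num)]
    omega
  refine ⟨e1, by omega, by omega, ?_, ?_⟩
  · rw [e1]
    have h := cast_loopI 7 10003 2 (by norm_num) ⟨1429, by norm_num⟩ 1 2 1 2
      (by norm_num) (by norm_num) (A - 2).toNat
    norm_num at h
    exact h.2
  · rw [e1]
    have h := cast_loopI 1429 10003 2 (by norm_num) ⟨7, by norm_num⟩ 1 2 1 2
      (by norm_num) (by norm_num) (A - 2).toNat
    norm_num at h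
    exact h.2

-- ===== VERDICT (by name: the statement is the Claim_ definition above) =====
theorem solve_spec : Claim_equal_solve := by
  unfold Claim_equal_solve Spec_solve
  intro A _
  by_cases hA : A ≤ 2
  · simp only [solve, solve_alt, if_pos hA]
  · have hA3 : 3 ≤ A := by omega
    obtain ⟨e1, hx0, hx1, c7, c1429⟩ := solveA_char A hA3
    obtain ⟨⟨b7a, b7b⟩, h7⟩ := ivModB_correct 7 (by norm_num) A hA3
    obtain ⟨⟨b14a, b14b⟩, h14⟩ := ivModB_correct 1429 (by norm_num) A hA3
    have m7 := (ZMod.intCast_eq_intCast_iff _ _ _).mp (c7.trans h7.symm)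
    have m14 := (ZMod.intCast_eq_intCast_iff _ _ _).mp (c1429.trans h14.symm)
    unfold Int.ModEq at m7 m14
    push_cast at m7 m14 b7a b7b b14a b14b
    simp only [solve_alt, if_neg hA]
    rw [PySem.Int.mod_eq_emod_of_pos (show (0 : Int) < 7 by norm_num),
        PySem.Int.mod_eq_emod_of_pos (show (0 : Int) < 10003 by norm_num)]
    omega
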